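-- pv_equiv track=rewrite | github.com/yiannis2804/mcp-context-forge | plugins/toon_encoder/toon.py | _quote_string
-- ===== SOURCE A (Python) =====
-- def _quote_string(s: str) -> str:
--     """Quote and escape a string unconditionally.
--
--     Per TOON spec, only these escapes are valid: \\\\ \\\" \\n \\r \\t
--     Control characters that can't be escaped must cause the string to be skipped.
--
--     Args:
--         s: String to quote.
--
--     Returns:
--         Quoted string with escapes applied.
--
--     Raises:
--         ValueError: If string contains unencodable control characters.
--     """
--     result = ['"']
--     for char in s:
--         if char == "\\":
--             result.append("\\\\")
--         elif char == '"':
--             result.append('\\"')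
--         elif char == "\n":
--             result.append("\\n")
--         elif char == "\r":
--             result.append("\\r")
--         elif char == "\t":
--             result.append("\\t")
--         elif ord(char) < 32:
--             # Per TOON spec, only the above escapes are valid
--             # Control characters that can't be escaped should cause an error
--             raise ValueError(f"Cannot encode control character U+{ord(char):04X} in TOON")
--         else:
--             result.append(char)
--     result.append('"')
--     return "".join(result)
-- ===== SOURCE B (Python) =====
-- def _quote_string(s: str) -> str:
--     # Validate first: reject the first char with ord < 32 that has no TOON escape.
--     for char in s:
--         if ord(char) < 32 and char not in "\n\r\t":
--             raise ValueError(f"Cannot encode control character U+{ord(char):04X} in TOON")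
--     # Transform: backslash first so later escapes are not double-escaped.
--     return (
--         '"'
--         + s.replace("\\", "\\\\")
--         .replace('"', '\\"')
--         .replace("\n", "\\n")
--         .replace("\r", "\\r")
--         .replace("\t", "\\t")
--         + '"'
--     )
-- ===== Notes on version B (the rewrite author's own statement) =====
-- stated objective: faster
-- what changed: Replaced the single branchy per-character accumulator loop with a validate-then-transform decomposition: a validation pass that raises the same ValueError, then chained str.replace calls (backslash first) between the quotes.
import Mathlib
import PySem

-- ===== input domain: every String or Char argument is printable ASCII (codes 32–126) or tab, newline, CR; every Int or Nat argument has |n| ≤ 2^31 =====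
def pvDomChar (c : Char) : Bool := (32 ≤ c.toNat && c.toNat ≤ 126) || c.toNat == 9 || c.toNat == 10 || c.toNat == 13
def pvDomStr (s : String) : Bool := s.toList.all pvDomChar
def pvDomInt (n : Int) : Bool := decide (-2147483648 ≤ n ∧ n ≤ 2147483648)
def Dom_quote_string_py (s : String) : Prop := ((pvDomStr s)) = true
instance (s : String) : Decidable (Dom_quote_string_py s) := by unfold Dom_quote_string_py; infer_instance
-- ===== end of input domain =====

-- B replaces A's single branchy per-character accumulator loop by a validate-then-transform
-- decomposition (validation pass, then chained single-char replaces); same values on Dom.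


-- ===== PORT A =====
-- A's loop: accumulate escaped pieces; `none` marks the ValueError branch
-- (unreachable on Dom, where every char below 32 is one of tab/newline/CR).
def qsLoopA : List Char → List String → Option (List String)
  | [], acc => some acc
  | c :: rest, acc =>
    if c = '\\' then qsLoopA rest (acc ++ ["\\\\"])
    else if c = '"' then qsLoopA rest (acc ++ ["\\\""])
    else if c = '\n' then qsLoopA rest (acc ++ ["\\n"])
    else if c = '\r' then qsLoopA rest (acc ++ ["\\r"])
    else if c = '\t' then qsLoopA rest (acc ++ ["\\t"])
    else if c.toNat < 32 then none  -- raise ValueError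
    else qsLoopA rest (acc ++ [String.ofList [c]])

def quote_string_py (s : String) : String :=
  match qsLoopA s.toList ["\""] with
  | none => ""  -- ValueError; never reached on Dom
  | some r => PySem.Str.join "" (r ++ ["\""])

-- ===== PORT B =====
-- B's validation pass (`false` = the ValueError branch; unreachable on Dom).
def qsValidB : List Char → Bool
  | [] => true
  | c :: rest => if c.toNat < 32 && !(c = '\n' || c = '\r' || c = '\t') then false else qsValidB rest

def quote_string_py_alt (s : String) : String :=
  if qsValidB s.toList then
    String.ofList ('"' ::
      PySem.Chars.replace (PySem.Chars.replace (PySem.Chars.replace (PySem.Chars.replace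
        (PySem.Chars.replace s.toList ['\\'] ['\\', '\\'])
        ['"'] ['\\', '"']) ['\n'] ['\\', 'n']) ['\r'] ['\\', 'r']) ['\t'] ['\\', 't']
      ++ ['"'])
  else ""  -- raise ValueError

-- ===== PRECONDITION & SPEC =====
def Spec_quote_string_py (s : String) (out : String) : Prop := out = quote_string_py_alt s
instance (s : String) (out : String) : Decidable (Spec_quote_string_py s out) := by unfold Spec_quote_string_py; infer_instance

-- ===== CLAIM (what is proved, stated in full; the proofs are below) =====
def Claim_equal_quote_string_py : Prop := ∀ (s : String), Dom_quote_string_py s → Spec_quote_string_py s (quote_string_py s)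

-- ===== LEMMAS AND PROOFS =====

-- the per-character escape both programs realise
def qsEsc (c : Char) : List Char :=
  if c = '\\' then ['\\', '\\']
  else if c = '"' then ['\\', '"']
  else if c = '\n' then ['\\', 'n']
  else if c = '\r' then ['\\', 'r']
  else if c = '\t' then ['\\', 't']
  else [c]

lemma replace_go_single (c : Char) (w : List Char) :
    ∀ (fuel : Nat) (l acc : List Char), l.length ≤ fuel →
      PySem.Chars.replace.go [c] w fuel l acc =
        acc.reverse ++ l.flatMap (fun x => if x = c then w else [x]) := by
  intro fuel
  induction fuel with
  | zero => intro l acc h; simp at h; subst h; simp [PySem.Chars.replace.go]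
  | succ n ih =>
    intro l acc h
    cases l with
    | nil => simp [PySem.Chars.replace.go]
    | cons x t =>
      simp only [PySem.Chars.replace.go]
      by_cases hx : x = c
      · subst hx
        rw [if_pos (by simp)]
        have hdrop : List.drop [x].length (x :: t) = t := rfl
        rw [hdrop, ih t (w.reverse ++ acc) (by simpa using Nat.le_of_succ_le_succ h)]
        simp
      · have hpre : ([c].isPrefixOf (x :: t)) = false := by
          simp [List.isPrefixOf_cons₂]; exact fun h' => (hx h'.symm).elim
        rw [hpre]
        simp only [Bool.false_eq_true, if_false]
        rw [ih t (x :: acc) (by simpa using Nat.le_of_succ_le_succ h)]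
        simp [hx]

lemma replace_single (s : List Char) (c : Char) (w : List Char) :
    PySem.Chars.replace s [c] w = s.flatMap (fun x => if x = c then w else [x]) := by
  simp only [PySem.Chars.replace, List.isEmpty_cons, Bool.false_eq_true, if_false]
  exact replace_go_single c w s.length s [] le_rfl

-- the five chained replaces act per character as qsEsc (on any input list)
lemma chain_eq_flatMap (l : List Char) :
    PySem.Chars.replace (PySem.Chars.replace (PySem.Chars.replace (PySem.Chars.replace
        (PySem.Chars.replace l ['\\'] ['\\', '\\'])
        ['"'] ['\\', '"']) ['\n'] ['\\', 'n']) ['\r'] ['\\', 'r']) ['\t'] ['\\', 't']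
      = l.flatMap qsEsc := by
  simp only [replace_single, List.flatMap_assoc]
  apply List.flatMap_congr
  intro c _
  by_cases h1 : c = '\\'
  · subst h1; decide
  by_cases h2 : c = '"'
  · subst h2; decide
  by_cases h3 : c = '\n'
  · subst h3; decide
  by_cases h4 : c = '\r'
  · subst h4; decide
  by_cases h5 : c = '\t'
  · subst h5; decide
  simp [qsEsc, h1, h2, h3, h4, h5]

lemma flatten_intersperse_nil {α : Type} (L : List (List α)) :
    (List.intersperse ([] : List α) L).flatten = L.flatten := by
  induction L with
  | nil => simp
  | cons a t ih => cases t <;> simp_all [List.intersperse]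

lemma char_eq_of_toNat_eq (a b : Char) (h : a.toNat = b.toNat) : a = b :=
  Char.ext (UInt32.toNat_inj.mp h)

lemma join_empty_toList (parts : List String) :
    (PySem.Str.join "" parts).toList = (parts.map String.toList).flatten := by
  simp only [PySem.Str.join, PySem.Chars.join, List.intercalate, String.toList_ofList]
  exact flatten_intersperse_nil _

-- A's loop result on Dom-valid input
lemma qsLoopA_spec (l : List Char) (h : l.all pvDomChar = true) :
    ∀ acc, qsLoopA l acc = some (acc ++ l.map (fun c => String.ofList (qsEsc c))) := by
  induction l with
  | nil => intro acc; simp [qsLoopA]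
  | cons c t ih =>
    intro acc
    simp only [List.all_cons, Bool.and_eq_true] at h
    obtain ⟨hc, ht⟩ := h
    by_cases h1 : c = '\\'
    · subst h1; simp [qsLoopA, ih ht, qsEsc]
    by_cases h2 : c = '"'
    · subst h2; simp [qsLoopA, ih ht, qsEsc]
    by_cases h3 : c = '\n'
    · subst h3; simp [qsLoopA, ih ht, qsEsc]
    by_cases h4 : c = '\r'
    · subst h4; simp [qsLoopA, ih ht, qsEsc]
    by_cases h5 : c = '\t'
    · subst h5; simp [qsLoopA, ih ht, qsEsc]
    · have hge : ¬ c.toNat < 32 := by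
        simp only [pvDomChar, Bool.or_eq_true, Bool.and_eq_true, decide_eq_true_eq,
          beq_iff_eq] at hc
        rcases hc with ((⟨h32, _⟩ | h9) | h10) | h13
        · omega
        · exact absurd (char_eq_of_toNat_eq c '\t' h9) h5
        · exact absurd (char_eq_of_toNat_eq c '\n' h10) h3
        · exact absurd (char_eq_of_toNat_eq c '\r' h13) h4
      simp only [qsLoopA, if_neg h1, if_neg h2, if_neg h3, if_neg h4, if_neg h5, if_neg hge,
        ih ht]
      simp [qsEsc, h1, h2, h3, h4, h5]

-- B's validation passes on Dom-valid input
lemma qsValidB_of_dom (l : List Char) (h : l.all pvDomChar = true) : qsValidB l = true := by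
  induction l with
  | nil => rfl
  | cons c t ih =>
    simp only [List.all_cons, Bool.and_eq_true] at h
    obtain ⟨hc, ht⟩ := h
    simp only [qsValidB]
    have : (c.toNat < 32 && !(c = '\n' || c = '\r' || c = '\t')) = false := by
      simp only [pvDomChar, Bool.or_eq_true, Bool.and_eq_true, decide_eq_true_eq,
        beq_iff_eq] at hc
      rcases hc with ((⟨h32, _⟩ | h9) | h10) | h13
      · simp; intro h'; omega
      · have : c = '\t' := char_eq_of_toNat_eq c '\t' h9
        simp [this]
      · have : c = '\n' := char_eq_of_toNat_eq c '\n' h10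
        simp [this]
      · have : c = '\r' := char_eq_of_toNat_eq c '\r' h13
        simp [this]
    rw [this]
    simpa using ih ht

-- ===== VERDICT (by name: the statement is the Claim_ definition above) =====
theorem quote_string_py_spec : Claim_equal_quote_string_py := by
  intro s hDom
  unfold Spec_quote_string_py
  have hall : s.toList.all pvDomChar = true := hDom
  unfold quote_string_py quote_string_py_alt
  rw [qsLoopA_spec s.toList hall, qsValidB_of_dom s.toList hall, if_pos rfl]
  simp only []
  apply String.toList_injective  -- equal toLists, equal strings
  rw [join_empty_toList, chain_eq_flatMap]
  simp [List.flatMap_def, Function.comp_def, String.toList_ofList]
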